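-- pv_equiv track=rewrite | github.com/D3struf/Killer-Sudoku | main.py | checkSubgridDuplicates
-- ===== SOURCE A (Python) =====
-- def checkSubgridDuplicates(matrix):
--     duplicates_count = 0
--     subgrid_size = 2
--
--     for start_row in range(0, len(matrix), subgrid_size):
--         for start_col in range(0, len(matrix[0]), subgrid_size):
--             unique_numbers = set()
--             duplicate_numbers = set()
--
--             for row in range(start_row, start_row + subgrid_size):
--                 for col in range(start_col, start_col + subgrid_size):
--                     num = matrix[row][col]
--                     if num in unique_numbers:
--                         duplicate_numbers.add(num)
--                     else:
--                         unique_numbers.add(num)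
--
--             duplicates_count += len(duplicate_numbers)
--
--     return duplicates_count
-- ===== SOURCE B (Python) =====
-- def checkSubgridDuplicates(matrix):
--     # One global frequency table instead of per-subgrid state: walk the grid one
--     # row-pair at a time, tallying each value under the key (pair start, c // 2, value),
--     # then count in a single final pass the entries that reached 2 or more.
--     counts = {}
--     for r in range(0, len(matrix), 2):
--         for c in range(len(matrix[0])):
--             for v in (matrix[r][c], matrix[r + 1][c]):
--                 key = (r, c // 2, v)
--                 counts[key] = counts.get(key, 0) + 1
--     return sum(1 for n in counts.values() if n >= 2)
-- ===== Notes on version B (the rewrite author's own statement) =====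
-- stated objective: alternative
-- what changed: A's per-subgrid nested loops with two transient sets (seen/duplicated) per 2x2 block are replaced by one global frequency table filled in a single row-pair/column sweep keyed by (row-pair start, column//2, value), followed by one filter pass counting table entries that reached 2; A's per-block state, inner block loops and per-block set-size additions all disappear.
import Mathlib
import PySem

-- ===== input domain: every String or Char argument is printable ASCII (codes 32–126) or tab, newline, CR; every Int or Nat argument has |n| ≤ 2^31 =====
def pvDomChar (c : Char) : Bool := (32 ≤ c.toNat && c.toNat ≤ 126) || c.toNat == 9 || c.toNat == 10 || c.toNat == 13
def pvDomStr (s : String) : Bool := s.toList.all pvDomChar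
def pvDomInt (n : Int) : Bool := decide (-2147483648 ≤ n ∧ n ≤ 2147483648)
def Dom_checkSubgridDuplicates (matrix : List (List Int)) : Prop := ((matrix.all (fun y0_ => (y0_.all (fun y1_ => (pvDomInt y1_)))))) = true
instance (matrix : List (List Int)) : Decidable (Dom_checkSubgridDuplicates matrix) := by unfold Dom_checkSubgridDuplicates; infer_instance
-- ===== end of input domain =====

-- B replaces A's per-subgrid nested loops (two transient sets per 2x2 block) by one global
-- frequency table filled in a single row-pair/column sweep under the key (pair start, c // 2, value),
-- followed by one filter pass over that table (alternative decomposition; same cost).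

-- ===== PORT A =====
def checkSubgridDuplicates (matrix : List (List Int)) : Int :=
  (PySem.List.pyRange 0 (matrix.length : Int) 2).foldl (fun duplicates_count start_row =>
    (PySem.List.pyRange 0 ((PySem.List.pyGetD matrix 0 []).length : Int) 2).foldl (fun duplicates_count start_col =>
      duplicates_count + PySem.Set.len
        (((PySem.List.pyRange start_row (start_row + 2) 1).foldl (fun st row =>
            (PySem.List.pyRange start_col (start_col + 2) 1).foldl
              (fun (st : PySem.Set Int × PySem.Set Int) col =>
                if st.1.contains (PySem.List.pyGetD (PySem.List.pyGetD matrix row []) col 0) then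
                  (st.1, st.2.add (PySem.List.pyGetD (PySem.List.pyGetD matrix row []) col 0))
                else
                  (st.1.add (PySem.List.pyGetD (PySem.List.pyGetD matrix row []) col 0), st.2)) st)
          ((PySem.Set.empty : PySem.Set Int), (PySem.Set.empty : PySem.Set Int))).2))
      duplicates_count) 0

-- ===== PORT B =====
def checkSubgridDuplicates_alt (matrix : List (List Int)) : Int :=
  (((PySem.List.pyRange 0 (matrix.length : Int) 2).foldl (fun counts r =>
      (PySem.List.pyRange 0 ((PySem.List.pyGetD matrix 0 []).length : Int) 1).foldl
        (fun (counts : PySem.Dict (Int × Int × Int) Int) c =>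
          [PySem.List.pyGetD (PySem.List.pyGetD matrix r []) c 0,
           PySem.List.pyGetD (PySem.List.pyGetD matrix (r + 1) []) c 0].foldl
            (fun (counts : PySem.Dict (Int × Int × Int) Int) v =>
              counts.insert (r, PySem.Int.floordiv c 2, v)
                (counts.getD (r, PySem.Int.floordiv c 2, v) 0 + 1)) counts) counts)
    PySem.Dict.empty).values.countP (fun n => decide (2 ≤ n)) : Int)

-- ===== PRECONDITION & SPEC =====
-- Pre_ excludes exactly the inputs on which the Python A raises IndexError: a nonempty matrix
-- whose first row is nonempty, with an odd number of rows, an odd first-row length, or some row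
-- shorter than the first row.
def Pre_checkSubgridDuplicates (matrix : List (List Int)) : Prop :=
  matrix = [] ∨ (matrix.headD []).length = 0 ∨
    (matrix.length % 2 = 0 ∧ (matrix.headD []).length % 2 = 0 ∧
      ∀ row ∈ matrix, (matrix.headD []).length ≤ row.length)
instance (matrix : List (List Int)) : Decidable (Pre_checkSubgridDuplicates matrix) := by
  unfold Pre_checkSubgridDuplicates; infer_instance

def pvWitness_checkSubgridDuplicates : List (List Int) := [[1, 1], [2, 3]]

def Spec_checkSubgridDuplicates (matrix : List (List Int)) (out : Int) : Prop := out = checkSubgridDuplicates_alt matrix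
instance (matrix : List (List Int)) (out : Int) : Decidable (Spec_checkSubgridDuplicates matrix out) := by unfold Spec_checkSubgridDuplicates; infer_instance

-- ===== CLAIM (what is proved, stated in full; the proofs are below) =====
def Claim_equal_checkSubgridDuplicates : Prop := ∀ (matrix : List (List Int)), Dom_checkSubgridDuplicates matrix → Pre_checkSubgridDuplicates matrix → Spec_checkSubgridDuplicates matrix (checkSubgridDuplicates matrix)

-- ===== LEMMAS AND PROOFS =====

-- the cell A and B both read (both index with pyGetD, default 0 / [])
def pvCell (matrix : List (List Int)) (r c : Int) : Int :=
  PySem.List.pyGetD (PySem.List.pyGetD matrix r []) c 0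

-- the four values of the 2x2 block at (sr, sc), in A's row-major visiting order
def pvVals (matrix : List (List Int)) (sr sc : Int) : List Int :=
  [pvCell matrix sr sc, pvCell matrix sr (sc + 1),
   pvCell matrix (sr + 1) sc, pvCell matrix (sr + 1) (sc + 1)]

-- number of distinct values occurring at least twice in L (what both programs count per block)
def pvDupN {α : Type} [BEq α] [LawfulBEq α] [DecidableEq α] (L : List α) : Nat :=
  (L.toFinset.filter (fun x => 2 ≤ L.count x)).card

-- A's inner-loop step on the (seen, duplicated) pair of sets.
def pvStep (st : PySem.Set Int × PySem.Set Int) (num : Int) : PySem.Set Int × PySem.Set Int :=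
  if st.1.contains num then (st.1, st.2.add num) else (st.1.add num, st.2)

-- Invariant of A's seen/duplicated fold.
lemma pvStep_inv (v : List Int) : ∀ (p : List Int) (u d : PySem.Set Int),
    (∀ x, x ∈ u ↔ x ∈ p) → (∀ x, x ∈ d ↔ 2 ≤ p.count x) → u.Nodup → d.Nodup →
    (∀ x, x ∈ (v.foldl pvStep (u, d)).1 ↔ x ∈ p ++ v) ∧
    (∀ x, x ∈ (v.foldl pvStep (u, d)).2 ↔ 2 ≤ (p ++ v).count x) ∧
    (v.foldl pvStep (u, d)).1.Nodup ∧ (v.foldl pvStep (u, d)).2.Nodup := by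
  
  induction v with
  | nil => intro p u d hu hd hnu hnd; simpa using ⟨hu, hd, hnu, hnd⟩
  | cons num v ih =>
    intro p u d hu hd hnu hnd
    have hfold : (num :: v).foldl pvStep (u, d) = v.foldl pvStep (pvStep (u, d) num) := rfl
    by_cases h : num ∈ u
    · have hc : PySem.Set.contains u num = true := (PySem.Set.contains_iff u num).mpr h
      have hstep : pvStep (u, d) num = (u, d.add num) := by
        simp only [pvStep, hc, if_true]
      have hmem : num ∈ p := (hu num).mp h
      have h2 : 1 ≤ p.count num := List.count_pos_iff.mpr hmem
      have := ih (p ++ [num]) u (d.add num)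
        (by intro x
            simp only [List.mem_append, List.mem_singleton, hu]
            constructor
            · exact Or.inl
            · rintro (hx | rfl)
              · exact hx
              · exact hmem)
        (by intro x
            rw [PySem.Set.mem_add, hd x, List.count_append]
            by_cases hx : x = num
            · have h1 : List.count x [num] = 1 := by simp [hx]
              have h3 : p.count x = p.count num := by rw [hx]
              rw [h1]
              constructor
              · intro _; omega
              · intro _; exact Or.inr hx
            · have h1 : List.count x [num] = 0 := List.count_eq_zero.mpr (by simp [hx])
              rw [h1]
              constructor
              · rintro (hxd | rfl)
                · omega
                · exact absurd rfl hx
              · intro hle; exact Or.inl (by omega))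
        hnu (PySem.Set.nodup_add d num hnd)
      rw [hfold, hstep]
      simpa [List.append_assoc] using this
    · have hc : PySem.Set.contains u num = false := by
        rcases Bool.eq_false_or_eq_true (PySem.Set.contains u num) with hcc | hcc
        · exact absurd ((PySem.Set.contains_iff u num).mp hcc) h
        · exact hcc
      have hstep : pvStep (u, d) num = (u.add num, d) := by
        simp only [pvStep, hc, if_false, Bool.false_eq_true]
      have hmem : num ∉ p := fun hx => h ((hu num).mpr hx)
      have h2 : p.count num = 0 := List.count_eq_zero.mpr hmem
      have := ih (p ++ [num]) (u.add num) d
        (by intro x; rw [PySem.Set.mem_add, hu x]; simp)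
        (by intro x
            rw [hd x, List.count_append]
            by_cases hx : x = num
            · have h1 : List.count x [num] = 1 := by simp [hx]
              have h3 : p.count x = 0 := by rw [hx]; exact h2
              rw [h1]; omega
            · have h1 : List.count x [num] = 0 := List.count_eq_zero.mpr (by simp [hx])
              rw [h1]; omega)
        (PySem.Set.nodup_add u num hnu) hnd
      rw [hfold, hstep]
      simpa [List.append_assoc] using this

-- length of a nodup list = card of the matching Finset filter
lemma pvLen_eq_card {α : Type} [DecidableEq α] (S L : List α) (p : α → Prop) [DecidablePred p]
    (hS : S.Nodup) (h : ∀ x, x ∈ S ↔ (x ∈ L ∧ p x)) :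
    S.length = (L.toFinset.filter p).card := by
  
  have hfin : S.toFinset = L.toFinset.filter p := by
    ext x
    simp [List.mem_toFinset, Finset.mem_filter, h x]
  rw [← List.toFinset_card_of_nodup hS, hfin]

-- A's duplicate-set size for a value list v is pvDupN v
lemma pvDupset_eq (v : List Int) :
    PySem.Set.len (v.foldl pvStep ((PySem.Set.empty : PySem.Set Int), (PySem.Set.empty : PySem.Set Int))).2
      = (pvDupN v : Int) := by
  
  obtain ⟨-, hmem, -, hnd⟩ := pvStep_inv v [] PySem.Set.empty PySem.Set.empty
    (by intro x; simp [PySem.Set.empty]) (by intro x; simp [PySem.Set.empty])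
    (by simp [PySem.Set.empty]) (by simp [PySem.Set.empty])
  simp only [List.nil_append] at hmem
  have hlen := pvLen_eq_card ((v.foldl pvStep (PySem.Set.empty, PySem.Set.empty)).2) v
    (fun x => 2 ≤ v.count x) hnd
    (by intro x
        rw [hmem x]
        constructor
        · intro h2; exact ⟨List.count_pos_iff.mp (by omega), h2⟩
        · exact And.right)
  show (((v.foldl pvStep (PySem.Set.empty, PySem.Set.empty)).2.length : Int)) = _
  rw [hlen]; rfl

-- B's table pass: entries of Counter(L) that reached 2 count the duplicated values of L
lemma pvCounter_dupN (L : List (Int × Int × Int)) :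
    (PySem.Dict.counter L).values.countP (fun n => decide (2 ≤ n)) = pvDupN L := by
  
  have hvals : (PySem.Dict.counter L).values
      = (PySem.Set.ofList L).map (fun x => ((L.count x : Nat) : Int)) := by
    show (PySem.Dict.counter L).items.map (·.2) = _
    rw [PySem.Dict.items_counter]
    simp [Function.comp]
  rw [hvals, List.countP_map]
  have hp : ((fun n => decide ((2 : Int) ≤ n)) ∘ fun x => ((L.count x : Nat) : Int))
      = fun x => decide (2 ≤ L.count x) := by
    funext x
    simp only [Function.comp]
    rw [decide_eq_decide]
    constructor <;> intro h <;> exact_mod_cast h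
  rw [hp, List.countP_eq_length_filter]
  unfold pvDupN
  exact pvLen_eq_card ((PySem.Set.ofList L).filter (fun x => decide (2 ≤ L.count x))) L
    (fun x => 2 ≤ L.count x)
    ((PySem.Set.nodup_ofList L).filter _)
    (by intro x
        simp [List.mem_filter, PySem.Set.mem_ofList])

lemma pvDupN_perm {α : Type} [BEq α] [LawfulBEq α] [DecidableEq α] {L L' : List α} (h : L.Perm L') :
    pvDupN L = pvDupN L' := by
  
  unfold pvDupN
  rw [List.toFinset_eq_of_perm _ _ h]
  congr 1
  apply Finset.filter_congr
  intro x _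
  rw [h.count_eq]

lemma pvDupN_append {α : Type} [BEq α] [LawfulBEq α] [DecidableEq α] (L1 L2 : List α)
    (h : ∀ x ∈ L1, x ∉ L2) : pvDupN (L1 ++ L2) = pvDupN L1 + pvDupN L2 := by
  
  unfold pvDupN
  rw [List.toFinset_append, Finset.filter_union]
  have h1 : L1.toFinset.filter (fun x => 2 ≤ (L1 ++ L2).count x)
      = L1.toFinset.filter (fun x => 2 ≤ L1.count x) := by
    apply Finset.filter_congr
    intro x hx
    rw [List.count_append, List.count_eq_zero.mpr (h x (List.mem_toFinset.mp hx))]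
    simp
  have h2 : L2.toFinset.filter (fun x => 2 ≤ (L1 ++ L2).count x)
      = L2.toFinset.filter (fun x => 2 ≤ L2.count x) := by
    apply Finset.filter_congr
    intro x hx
    have hx2 : x ∈ L2 := List.mem_toFinset.mp hx
    have hx1 : x ∉ L1 := fun hx1 => h x hx1 hx2
    rw [List.count_append, List.count_eq_zero.mpr hx1]
    simp
  rw [h1, h2]
  apply Finset.card_union_of_disjoint
  rw [Finset.disjoint_left]
  intro x hx hx'
  exact h x (List.mem_toFinset.mp (Finset.mem_of_mem_filter x hx))
    (List.mem_toFinset.mp (Finset.mem_of_mem_filter x hx'))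

lemma pvDupN_map_mk (a b : Int) (L : List Int) :
    pvDupN (L.map (fun v => (a, b, v))) = pvDupN L := by
  
  have hinj : Function.Injective (fun v : Int => ((a, b, v) : Int × Int × Int)) := by
    intro x y hxy; simpa using hxy
  unfold pvDupN
  have hfin : (L.map (fun v => ((a, b, v) : Int × Int × Int))).toFinset
      = L.toFinset.image (fun v => ((a, b, v) : Int × Int × Int)) := by
    ext y; simp
  rw [hfin, Finset.filter_image]
  rw [Finset.card_image_of_injective _ hinj]
  congr 1
  apply Finset.filter_congr
  intro x _
  rw [List.count_map_of_injective L _ hinj x]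

-- blocks with pairwise different tags contribute independently
lemma pvDupN_flatMap (l : List Nat) (F : Nat → List (Int × Int × Int)) (g : Int × Int × Int → Nat)
    (hl : l.Nodup) (hg : ∀ i ∈ l, ∀ x ∈ F i, g x = i) :
    pvDupN (l.flatMap F) = (l.map (fun i => pvDupN (F i))).sum := by
  
  induction l with
  | nil => simp [pvDupN]
  | cons i l ih =>
    rw [List.flatMap_cons, List.map_cons, List.sum_cons]
    rw [pvDupN_append]
    · rw [ih hl.of_cons (fun j hj x hx => hg j (List.mem_cons_of_mem i hj) x hx)]
    · intro x hx hx'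
      obtain ⟨j, hj, hxj⟩ := List.mem_flatMap.mp hx'
      have h1 : g x = i := hg i (List.mem_cons_self) x hx
      have h2 : g x = j := hg j (List.mem_cons_of_mem i hj) x hxj
      exact (List.nodup_cons.mp hl).1 (h1 ▸ h2 ▸ hj)

-- range(0, 2*m, 1) grouped in consecutive pairs
lemma pvRange_double {α : Type} (m : Nat) (F : Nat → List α) :
    (List.range (2 * m)).flatMap F = (List.range m).flatMap (fun i => F (2 * i) ++ F (2 * i + 1)) := by
  
  induction m with
  | zero => simp
  | succ m ih =>
    have : 2 * (m + 1) = (2 * m + 1) + 1 := by ring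
    rw [this, List.range_succ, List.range_succ, List.range_succ]
    rw [List.flatMap_append, List.flatMap_append, ih]
    simp [List.append_assoc]

lemma pvPyRange_one_nat (n : Nat) :
    PySem.List.pyRange 0 (n : Int) 1 = (List.range n).map (fun i : Nat => (i : Int)) := by
  
  rw [PySem.List.pyRange_one]
  have h0 : (((n : Int)) - 0).toNat = n := by omega
  rw [h0]
  apply List.map_congr_left
  intro i _
  omega

lemma pvPyRange_two (m : Nat) :
    PySem.List.pyRange 0 ((2 * m : Nat) : Int) 2 = (List.range m).map (fun i : Nat => ((2 * i : Nat) : Int)) := by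
  
  rw [PySem.List.pyRange_of_pos 0 ((2 * m : Nat) : Int) (by norm_num)]
  rcases Nat.eq_zero_or_pos m with hm | hm
  · subst hm; simp
  · have hpos : (0 : Int) < ((2 * m : Nat) : Int) := by exact_mod_cast Nat.pos_of_ne_zero (by omega)
    rw [if_pos hpos]
    have htn : ((((2 * m : Nat) : Int) - 0 + 2 - 1) / 2).toNat = m := by omega
    rw [htn]
    apply List.map_congr_left
    intro i _
    push_cast
    ring

lemma pvPyRange_pair (a : Int) : PySem.List.pyRange a (a + 2) 1 = [a, a + 1] := by
  
  rw [PySem.List.pyRange_one]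
  have : (a + 2 - a).toNat = 2 := by omega
  rw [this]
  simp [List.range_succ]

lemma pvFloordiv_two (n : Nat) : PySem.Int.floordiv (n : Int) 2 = ((n / 2 : Nat) : Int) := by
  exact_mod_cast PySem.Int.floordiv_natCast n 2

-- A's per-block computation equals pvDupN of the block's four values
lemma pvAblock (matrix : List (List Int)) (sr sc : Int) :
    PySem.Set.len
      (((PySem.List.pyRange sr (sr + 2) 1).foldl (fun st row =>
          (PySem.List.pyRange sc (sc + 2) 1).foldl
            (fun (st : PySem.Set Int × PySem.Set Int) col =>
              if st.1.contains (PySem.List.pyGetD (PySem.List.pyGetD matrix row []) col 0) then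
                (st.1, st.2.add (PySem.List.pyGetD (PySem.List.pyGetD matrix row []) col 0))
              else
                (st.1.add (PySem.List.pyGetD (PySem.List.pyGetD matrix row []) col 0), st.2)) st)
        ((PySem.Set.empty : PySem.Set Int), (PySem.Set.empty : PySem.Set Int))).2)
      = (pvDupN (pvVals matrix sr sc) : Int) := by
  rw [pvPyRange_pair sr, pvPyRange_pair sc]
  have := pvDupset_eq (pvVals matrix sr sc)
  simp only [pvVals, pvCell, List.foldl_cons, List.foldl_nil, pvStep] at this ⊢
  exact this

-- B's global key list for a (2*m) x (2*k) grid, decomposed into tagged per-block lists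
lemma pvKeys_dupN (matrix : List (List Int)) (m k : Nat) :
    pvDupN ((List.range m).flatMap (fun i : Nat => (List.range (2 * k)).flatMap (fun c : Nat =>
        [(((2 * i : Nat) : Int), PySem.Int.floordiv (c : Int) 2, pvCell matrix ((2 * i : Nat) : Int) (c : Int)),
         (((2 * i : Nat) : Int), PySem.Int.floordiv (c : Int) 2, pvCell matrix (((2 * i : Nat) : Int) + 1) (c : Int))])))
      = ((List.range m).map (fun i =>
          ((List.range k).map (fun j => pvDupN (pvVals matrix ((2 * i : Nat) : Int) ((2 * j : Nat) : Int)))).sum)).sum := by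
  have htag : ∀ i j : Nat,
      ([(((2 * i : Nat) : Int), PySem.Int.floordiv ((2 * j : Nat) : Int) 2, pvCell matrix ((2 * i : Nat) : Int) ((2 * j : Nat) : Int)),
        (((2 * i : Nat) : Int), PySem.Int.floordiv ((2 * j : Nat) : Int) 2, pvCell matrix (((2 * i : Nat) : Int) + 1) ((2 * j : Nat) : Int))]
       ++ [(((2 * i : Nat) : Int), PySem.Int.floordiv ((2 * j + 1 : Nat) : Int) 2, pvCell matrix ((2 * i : Nat) : Int) ((2 * j + 1 : Nat) : Int)),
           (((2 * i : Nat) : Int), PySem.Int.floordiv ((2 * j + 1 : Nat) : Int) 2, pvCell matrix (((2 * i : Nat) : Int) + 1) ((2 * j + 1 : Nat) : Int))])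
      = ([pvCell matrix ((2 * i : Nat) : Int) ((2 * j : Nat) : Int),
          pvCell matrix (((2 * i : Nat) : Int) + 1) ((2 * j : Nat) : Int),
          pvCell matrix ((2 * i : Nat) : Int) (((2 * j : Nat) : Int) + 1),
          pvCell matrix (((2 * i : Nat) : Int) + 1) (((2 * j : Nat) : Int) + 1)]).map
          (fun v => (((2 * i : Nat) : Int), ((j : Nat) : Int), v)) := by
    intro i j
    have e3 : (2 * j) / 2 = j := by omega
    have e4 : (2 * j + 1) / 2 = j := by omega
    have hc : ((2 * j + 1 : Nat) : Int) = ((2 * j : Nat) : Int) + 1 := by push_cast; ring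
    simp only [pvFloordiv_two, e3, e4]
    simp only [hc, List.map, List.cons_append, List.nil_append]
  have hcol : ∀ i : Nat, ((List.range (2 * k)).flatMap (fun c : Nat =>
        [(((2 * i : Nat) : Int), PySem.Int.floordiv (c : Int) 2, pvCell matrix ((2 * i : Nat) : Int) (c : Int)),
         (((2 * i : Nat) : Int), PySem.Int.floordiv (c : Int) 2, pvCell matrix (((2 * i : Nat) : Int) + 1) (c : Int))]))
      = (List.range k).flatMap (fun j : Nat =>
          ([pvCell matrix ((2 * i : Nat) : Int) ((2 * j : Nat) : Int),
            pvCell matrix (((2 * i : Nat) : Int) + 1) ((2 * j : Nat) : Int),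
            pvCell matrix ((2 * i : Nat) : Int) (((2 * j : Nat) : Int) + 1),
            pvCell matrix (((2 * i : Nat) : Int) + 1) (((2 * j : Nat) : Int) + 1)]).map
            (fun v => (((2 * i : Nat) : Int), ((j : Nat) : Int), v))) := by
    intro i
    rw [pvRange_double k]
    exact congrArg (fun F : Nat → List (Int × Int × Int) => (List.range k).flatMap F)
      (funext (fun j => htag i j))
  rw [congrArg (fun F : Nat → List (Int × Int × Int) => (List.range m).flatMap F)
      (funext (fun i => hcol i))]
  rw [pvDupN_flatMap (List.range m) _ (fun t => t.1.toNat / 2) List.nodup_range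
    (by intro i _ x hx
        obtain ⟨j, _, hxj⟩ := List.mem_flatMap.mp hx
        obtain ⟨v, _, rfl⟩ := List.mem_map.mp hxj
        simp
        omega)]
  apply congrArg
  apply List.map_congr_left
  intro i _
  rw [pvDupN_flatMap (List.range k) _ (fun t => t.2.1.toNat) List.nodup_range
    (by intro j _ x hx
        obtain ⟨v, _, rfl⟩ := List.mem_map.mp hx
        simp)]
  apply congrArg
  apply List.map_congr_left
  intro j _
  rw [pvDupN_map_mk]
  apply pvDupN_perm
  simp only [pvVals]
  exact (List.Perm.swap _ _ _).cons _

-- ===== VERDICT (by name: the statement is the Claim_ definition above) =====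
theorem checkSubgridDuplicates_spec : Claim_equal_checkSubgridDuplicates := by
  intro matrix _ hpre
  unfold Spec_checkSubgridDuplicates
  have hfirst : PySem.List.pyGetD matrix 0 [] = matrix.headD [] := by
    cases matrix <;> simp [pysem]
  by_cases hnil : matrix = []
  · subst hnil; decide
  · by_cases hzero : (matrix.headD []).length = 0
    · -- first row empty: both programs run empty inner loops and return 0
      unfold checkSubgridDuplicates checkSubgridDuplicates_alt
      rw [hfirst, hzero]
      have h02 : PySem.List.pyRange 0 (0 : Int) 2 = [] := by decide
      have h01 : PySem.List.pyRange 0 (0 : Int) 1 = [] := by decide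
      simp [h02, h01]
    · -- main case: 2m x 2k grid
      have hR : matrix.length % 2 = 0 := by
        rcases hpre with h | h | ⟨h1, _, _⟩
        · exact absurd h hnil
        · exact absurd h hzero
        · exact h1
      have hC : (matrix.headD []).length % 2 = 0 := by
        rcases hpre with h | h | ⟨_, h2, _⟩
        · exact absurd h hnil
        · exact absurd h hzero
        · exact h2
      obtain ⟨m, hm⟩ : ∃ m, matrix.length = 2 * m := ⟨matrix.length / 2, by omega⟩
      obtain ⟨k, hk⟩ : ∃ k, (matrix.headD []).length = 2 * k := ⟨(matrix.headD []).length / 2, by omega⟩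
      unfold checkSubgridDuplicates checkSubgridDuplicates_alt
      rw [hfirst, hm, hk]
      rw [pvPyRange_two m, pvPyRange_two k, pvPyRange_one_nat (2 * k)]
      -- A side: nested additive folds become a double sum of per-block duplicate counts
      rw [List.foldl_map]
      simp only [List.foldl_map, pvAblock matrix]
      simp only [PySem.List.foldl_add]
      -- B side: the nested insert fold is Counter of the row-major key list
      have hB : (List.foldl (fun (x : PySem.Dict (Int × Int × Int) Int) (y : Nat) =>
            List.foldl (fun (x : PySem.Dict (Int × Int × Int) Int) (y1 : Nat) =>
              List.foldl (fun (x : PySem.Dict (Int × Int × Int) Int) v =>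
                  x.insert (((2 * y : Nat) : Int), PySem.Int.floordiv (y1 : Int) 2, v)
                    (x.getD (((2 * y : Nat) : Int), PySem.Int.floordiv (y1 : Int) 2, v) 0 + 1))
                x
                [PySem.List.pyGetD (PySem.List.pyGetD matrix ((2 * y : Nat) : Int) []) (y1 : Int) 0,
                 PySem.List.pyGetD (PySem.List.pyGetD matrix (((2 * y : Nat) : Int) + 1) []) (y1 : Int) 0])
              x (List.range (2 * k)))
            PySem.Dict.empty (List.range m))
          = PySem.Dict.counter ((List.range m).flatMap (fun i : Nat => (List.range (2 * k)).flatMap (fun c : Nat =>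
              [(((2 * i : Nat) : Int), PySem.Int.floordiv (c : Int) 2, pvCell matrix ((2 * i : Nat) : Int) (c : Int)),
               (((2 * i : Nat) : Int), PySem.Int.floordiv (c : Int) 2, pvCell matrix (((2 * i : Nat) : Int) + 1) (c : Int))]))) := by
        rw [← PySem.Dict.foldl_insert_getD_add_one_eq_counter, List.foldl_flatMap]
        congr 1
        funext d i
        rw [List.foldl_flatMap]
        congr 1
      rw [hB, pvCounter_dupN, pvKeys_dupN matrix m k]
      push_cast
      simp [Function.comp_def, Nat.cast_list_sum, List.map_map]
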